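-- pv_equiv track=rewrite | github.com/swharden/SWHLab | swhlab/common.py | parent
-- ===== SOURCE A (Python) =====
-- def parent(groups,ID):
--     """given a groups dictionary and an ID, return its actual parent ID."""
--     if ID in groups.keys():
--         return ID # already a parent
--     if not ID in groups.keys():
--         for actualParent in groups.keys():
--             if ID in groups[actualParent]:
--                 return actualParent # found the actual parent
--     return None # doesn't have a parent in this group!
-- ===== SOURCE B (Python) =====
-- def parent(groups, ID):
--     """given a groups dictionary and an ID, return its actual parent ID."""
--     if ID in groups:
--         return ID  # already a parent
--     index = {}
--     for key, members in groups.items():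
--         for m in members:
--             if m not in index:  # first group in iteration order wins
--                 index[m] = key
--     return index.get(ID)
-- ===== Notes on version B (the rewrite author's own statement) =====
-- stated objective: alternative
-- what changed: Replaces the scan over keys with repeated groups[key] lookups by a single pass that builds an inverted member-to-group index (first occurrence wins) followed by one dictionary lookup.
import Mathlib
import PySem

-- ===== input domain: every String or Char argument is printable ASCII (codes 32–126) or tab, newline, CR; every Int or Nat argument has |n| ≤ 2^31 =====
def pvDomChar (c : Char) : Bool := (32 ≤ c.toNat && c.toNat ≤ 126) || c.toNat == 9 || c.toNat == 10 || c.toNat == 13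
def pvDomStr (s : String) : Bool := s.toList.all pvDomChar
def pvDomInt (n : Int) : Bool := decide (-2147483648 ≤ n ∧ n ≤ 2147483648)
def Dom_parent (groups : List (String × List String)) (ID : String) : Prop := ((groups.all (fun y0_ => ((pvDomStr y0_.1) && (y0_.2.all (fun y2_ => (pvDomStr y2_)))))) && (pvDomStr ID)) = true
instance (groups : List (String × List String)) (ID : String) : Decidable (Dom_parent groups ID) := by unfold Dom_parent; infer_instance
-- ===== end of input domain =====

-- Header: B builds an inverted member→group index in one pass and answers by a single lookup,
-- instead of A's scan over the keys with a groups[key] membership test at each step (objective: alternative).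

-- ===== PORT A =====
-- groups[k] on the association list modelling the dict: value of the first pair whose key is k
def pyLookup (groups : List (String × List String)) (k : String) : List String :=
  ((groups.find? (fun p => p.1 == k)).map (·.2)).getD []

-- 'for actualParent in groups.keys(): if ID in groups[actualParent]: return actualParent'
def parentScan (groups : List (String × List String)) (keys : List String) (ID : String) : Option String :=
  match keys with
  | [] => none
  | k :: rest => if ID ∈ pyLookup groups k then some k else parentScan groups rest ID

def parent (groups : List (String × List String)) (ID : String) : Option String :=
  if ID ∈ groups.map (·.1) then some ID
  else parentScan groups (groups.map (·.1)) ID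

-- ===== PORT B =====
-- 'for key, members in groups.items(): for m in members: if m not in index: index[m] = key'
def buildIndex (groups : List (String × List String)) : PySem.Dict String String :=
  groups.foldl
    (fun idx p => p.2.foldl (fun idx m => if idx.contains m then idx else idx.insert m p.1) idx)
    PySem.Dict.empty

def parent_alt (groups : List (String × List String)) (ID : String) : Option String :=
  if ID ∈ groups.map (·.1) then some ID
  else (buildIndex groups).get? ID

-- ===== PRECONDITION & SPEC =====
-- The association list models a Python dict, whose keys are necessarily distinct; on lists with
-- duplicate first components no Python dict input corresponds, so they are excluded.
def Pre_parent (groups : List (String × List String)) (ID : String) : Prop :=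
  (groups.map (·.1)).Nodup
instance (groups : List (String × List String)) (ID : String) : Decidable (Pre_parent groups ID) := by
  unfold Pre_parent; infer_instance

def pvWitness_parent : (List (String × List String)) × String := ([("g1", ["a", "b"]), ("g2", ["c"])], "c")

def Spec_parent (groups : List (String × List String)) (ID : String) (out : Option String) : Prop := out = parent_alt groups ID
instance (groups : List (String × List String)) (ID : String) (out : Option String) : Decidable (Spec_parent groups ID out) := by unfold Spec_parent; infer_instance

-- ===== CLAIM (what is proved, stated in full; the proofs are below) =====
def Claim_equal_parent : Prop := ∀ (groups : List (String × List String)) (ID : String), Dom_parent groups ID → Pre_parent groups ID → Spec_parent groups ID (parent groups ID)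

-- ===== LEMMAS AND PROOFS =====

-- first pair (in order) whose member list contains ID
def firstPair (groups : List (String × List String)) (ID : String) : Option String :=
  match groups with
  | [] => none
  | (k, v) :: rest => if ID ∈ v then some k else firstPair rest ID

-- the inner loop of B, characterised
theorem inner_get? (members : List String) (key ID : String) (d : PySem.Dict String String) :
    (members.foldl (fun idx m => if idx.contains m then idx else idx.insert m key) d).get? ID =
      if d.contains ID then d.get? ID else if ID ∈ members then some key else none := by
  induction members generalizing d with
  | nil =>
    simp only [List.foldl_nil, List.not_mem_nil, if_false]
    split_ifs with h
    · rfl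
    · exact (PySem.Dict.get?_eq_none_iff_contains d ID).mpr (Bool.not_eq_true _ ▸ eq_false_of_ne_true h)
  | cons m rest ih =>
    simp only [List.foldl_cons]
    by_cases hm : d.contains m = true
    · rw [if_pos hm, ih d]
      by_cases hID : d.contains ID = true
      · simp [hID]
      · rcases eq_or_ne ID m with rfl | hne
        · simp_all
        · simp [hID, List.mem_cons, hne]
    · rw [if_neg hm, ih]
      rcases eq_or_ne ID m with rfl | hne
      · have hc : (d.insert ID key).contains ID = true := PySem.Dict.contains_insert_self d ID key
        simp only [List.mem_cons, true_or, if_true]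
        rw [if_pos hc, PySem.Dict.get?_insert_self]
        simp [hm]
      · have hc : (d.insert m key).contains ID = d.contains ID := by
          rw [PySem.Dict.contains_insert]; simp [hne]
        rw [hc, PySem.Dict.get?_insert_of_ne d key hne]
        by_cases hID : d.contains ID = true
        · simp [hID]
        · simp [hID, List.mem_cons, hne]

theorem inner_contains (members : List String) (key ID : String) (d : PySem.Dict String String) :
    (members.foldl (fun idx m => if idx.contains m then idx else idx.insert m key) d).contains ID =
      (d.contains ID || decide (ID ∈ members)) := by
  rw [PySem.Dict.contains_eq_isSome_get?, inner_get? members key ID d]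
  by_cases hID : d.contains ID = true
  · simp [hID, ← PySem.Dict.contains_eq_isSome_get?]
  · by_cases hm : ID ∈ members <;> simp [hID, hm]

-- the outer loop of B, characterised against the first-matching-pair scan
theorem outer_get? (groups : List (String × List String)) (ID : String) (d : PySem.Dict String String) :
    (groups.foldl
      (fun idx p => p.2.foldl (fun idx m => if idx.contains m then idx else idx.insert m p.1) idx)
      d).get? ID =
      if d.contains ID then d.get? ID else firstPair groups ID := by
  induction groups generalizing d with
  | nil =>
    simp only [List.foldl_nil, firstPair]
    split_ifs with h
    · rfl
    · exact (PySem.Dict.get?_eq_none_iff_contains d ID).mpr (eq_false_of_ne_true h)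
  | cons p rest ih =>
    obtain ⟨k, v⟩ := p
    simp only [List.foldl_cons]
    rw [ih, inner_contains, inner_get?]
    by_cases hID : d.contains ID = true
    · simp [hID]
    · by_cases hv : ID ∈ v
      · simp [hID, hv, firstPair]
      · simp [hID, hv, firstPair]

-- A's scan over keys equals the first-matching-pair scan, when keys are distinct
theorem scan_eq_firstPair (ID : String) :
    ∀ (suf pre : List (String × List String)),
    ((pre ++ suf).map (·.1)).Nodup →
    parentScan (pre ++ suf) (suf.map (·.1)) ID = firstPair suf ID := by
  intro suf
  induction suf with
  | nil => intro pre _; simp [parentScan, firstPair]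
  | cons p rest ih =>
    intro pre hnd
    obtain ⟨k, v⟩ := p
    have hknot : k ∉ pre.map (·.1) := by
      intro hk
      rw [List.map_append, List.nodup_append] at hnd
      exact hnd.2.2 k hk k (by simp) rfl
    have hfind : (pre ++ (k, v) :: rest).find? (fun p => p.1 == k) = some (k, v) := by
      rw [List.find?_append]
      have h1 : pre.find? (fun p => p.1 == k) = none := by
        rw [List.find?_eq_none]
        intro q hq
        simp only [beq_iff_eq]
        exact fun h => hknot (h ▸ List.mem_map_of_mem hq)
      simp [h1]
    have hlk : pyLookup (pre ++ (k, v) :: rest) k = v := by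
      simp [pyLookup, hfind]
    simp only [List.map_cons, parentScan, hlk]
    by_cases hv : ID ∈ v
    · simp [hv, firstPair]
    · have hstep : pre ++ (k, v) :: rest = (pre ++ [(k, v)]) ++ rest := by simp
      rw [if_neg hv]
      have := ih (pre ++ [(k, v)]) (by rw [← hstep]; exact hnd)
      rw [← hstep] at this
      rw [this]
      simp [firstPair, hv]

-- ===== VERDICT (by name: the statement is the Claim_ definition above) =====
theorem parent_spec : Claim_equal_parent := by
  intro groups ID _ hpre
  unfold Spec_parent parent parent_alt
  by_cases hk : ID ∈ groups.map (·.1)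
  · simp [hk]
  · rw [if_neg hk, if_neg hk, buildIndex, outer_get?]
    have h0 : (PySem.Dict.empty : PySem.Dict String String).contains ID = false :=
      PySem.Dict.contains_empty ID
    rw [h0]
    simp only [if_neg (by simp : ¬ (false = true))]
    have := scan_eq_firstPair ID groups [] (by simpa using hpre)
    simpa using this
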